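-- pv_equiv track=rewrite | github.com/LyleMi/Saker | saker/brute/brute.py | itert
-- ===== SOURCE A (Python) =====
-- import string
-- import itertools
--
-- def itert(start=1, end=0, charset=""):
--     if not charset:
--         charset = string.printable[:-5]
--     if end == 0:
--         end = len(charset) + 1
--     for k in range(start, end):
--         for i in itertools.product(charset, repeat=k):
--             s = ''.join(i)
--             yield s
-- ===== SOURCE B (Python) =====
-- import string
--
-- def itert(start=1, end=0, charset=""):
--     # Ranking/unranking: for each length k there are m**k words; enumerate their
--     # ranks n and decode each n to its k-digit base-m representation via divmod,
--     # indexing charset with the digits (most significant digit first).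
--     if not charset:
--         charset = string.printable[:-5]
--     if end == 0:
--         end = len(charset) + 1
--     m = len(charset)
--     for k in range(start, end):
--         for n in range(m ** k):
--             digits = []
--             x = n
--             for _ in range(k):
--                 x, r = divmod(x, m)
--                 digits.append(charset[r])
--             yield ''.join(reversed(digits))
-- ===== Notes on version B (the rewrite author's own statement) =====
-- stated objective: alternative
-- what changed: Replaces the cartesian-product expansion with integer unranking: for each length k it iterates a rank n over range(m**k) and decodes n into its base-m digits via repeated divmod, indexing the charset with each digit.
import Mathlib
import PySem

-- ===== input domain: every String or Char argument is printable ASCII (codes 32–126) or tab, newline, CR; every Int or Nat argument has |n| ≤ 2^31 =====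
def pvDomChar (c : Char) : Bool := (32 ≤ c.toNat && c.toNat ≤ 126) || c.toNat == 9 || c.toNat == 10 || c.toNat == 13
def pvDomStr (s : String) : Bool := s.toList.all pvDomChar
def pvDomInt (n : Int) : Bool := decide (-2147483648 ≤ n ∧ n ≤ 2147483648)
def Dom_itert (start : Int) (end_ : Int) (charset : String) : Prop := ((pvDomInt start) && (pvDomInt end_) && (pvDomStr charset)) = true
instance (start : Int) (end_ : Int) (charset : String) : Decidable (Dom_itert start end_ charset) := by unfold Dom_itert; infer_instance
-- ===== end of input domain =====

-- B replaces the cartesian-product expansion by integer unranking (base-m decoding of each rank); objective: alternative, same cost.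

-- ===== PORT A =====
-- string.printable[:-5]
def pvDefaultCharset : String :=
  "0123456789abcdefghijklmnopqrstuvwxyzABCDEFGHIJKLMNOPQRSTUVWXYZ!\"#$%&'()*+,-./:;<=>?@[\\]^_`{|}~ "

-- itertools.product(charset, repeat=k): leftmost position varies slowest
def pvProd (cs : List Char) : Nat → List (List Char)
  | 0 => [[]]
  | k + 1 => cs.flatMap (fun c => (pvProd cs k).map (fun t => c :: t))

def itert (start : Int) (end_ : Int) (charset : String) : List String :=
  let cs := if charset = "" then pvDefaultCharset else charset
  let e : Int := if end_ = 0 then (cs.toList.length : Int) + 1 else end_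
  (PySem.List.pyRange start e 1).flatMap
    (fun k => (pvProd cs.toList k.toNat).map (fun t => String.ofList t))

-- ===== PORT B =====
-- the inner loop: x = n; for _ in range(k): x, r = divmod(x, m); digits.append(charset[r])
def pvDecodeLoop (cs : List Char) : Nat → Int → List Char → List Char
  | 0, _, acc => acc
  | k + 1, x, acc =>
      let q := PySem.Int.floordiv x (cs.length : Int)
      let r := PySem.Int.mod x (cs.length : Int)
      pvDecodeLoop cs k q (acc ++ [PySem.List.pyGetD cs r ' '])

def itert_alt (start : Int) (end_ : Int) (charset : String) : List String :=
  let cs := if charset = "" then pvDefaultCharset else charset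
  let e : Int := if end_ = 0 then (cs.toList.length : Int) + 1 else end_
  let m : Int := (cs.toList.length : Int)
  (PySem.List.pyRange start e 1).flatMap
    (fun k => (PySem.List.pyRange 0 (m ^ k.toNat) 1).map
      (fun n => String.ofList (pvDecodeLoop cs.toList k.toNat n []).reverse))

-- ===== PRECONDITION & SPEC =====
-- Pre_ excludes inputs where range(start, end) reaches a negative k, on which
-- A raises ValueError (itertools.product with negative repeat); B raises there too (TypeError).
def Pre_itert (start : Int) (end_ : Int) (charset : String) : Prop :=
  let cs := if charset = "" then pvDefaultCharset else charset
  let e : Int := if end_ = 0 then (cs.toList.length : Int) + 1 else end_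
  0 ≤ start ∨ e ≤ start
instance (start : Int) (end_ : Int) (charset : String) : Decidable (Pre_itert start end_ charset) := by unfold Pre_itert; infer_instance

def pvWitness_itert : Int × Int × String := (0, 3, "ab")

def Spec_itert (start : Int) (end_ : Int) (charset : String) (out : List String) : Prop := out = itert_alt start end_ charset
instance (start : Int) (end_ : Int) (charset : String) (out : List String) : Decidable (Spec_itert start end_ charset out) := by unfold Spec_itert; infer_instance

-- ===== CLAIM (what is proved, stated in full; the proofs are below) =====
def Claim_equal_itert : Prop := ∀ (start : Int) (end_ : Int) (charset : String), Dom_itert start end_ charset → Pre_itert start end_ charset → Spec_itert start end_ charset (itert start end_ charset)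

-- ===== LEMMAS AND PROOFS =====

-- itertools.product in snoc form: extend on the right, rightmost varies fastest
theorem pvFlatMapSingle {α β : Type} (f : α → β) (xs : List α) :
    xs.flatMap (fun x => [f x]) = xs.map f := by
  induction xs with
  | nil => rfl
  | cons x xs ih => simp [List.flatMap_cons, ih]

theorem pvProd_snoc (cs : List Char) (k : Nat) :
    pvProd cs (k + 1) = (pvProd cs k).flatMap (fun t => cs.map (fun c => t ++ [c])) := by
  induction k with
  | zero => simp [pvProd, pvFlatMapSingle]
  | succ n ih =>
      calc pvProd cs (n + 2)
          = cs.flatMap (fun c => (pvProd cs (n + 1)).map (fun t => c :: t)) := rfl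
        _ = cs.flatMap (fun c => ((pvProd cs n).flatMap (fun t => cs.map (fun d => t ++ [d]))).map (fun t => c :: t)) := by rw [ih]
        _ = (pvProd cs (n + 1)).flatMap (fun t => cs.map (fun c => t ++ [c])) := by
            simp [pvProd, List.map_flatMap, List.flatMap_map, List.flatMap_assoc, List.map_map,
              Function.comp_def]

-- the decode loop's accumulator is a prefix
theorem pvDecodeLoop_append (cs : List Char) (k : Nat) (x : Int) (acc : List Char) :
    pvDecodeLoop cs k x acc = acc ++ pvDecodeLoop cs k x [] := by
  induction k generalizing x acc with
  | zero => simp [pvDecodeLoop]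
  | succ n ih =>
      rw [pvDecodeLoop, pvDecodeLoop, ih, ih (acc := [] ++ _)]
      simp

-- range(a*b) enumerated as a blocks of size b
theorem pvRangeMulFlatMap {β : Type} (f : Nat → β) (a b : Nat) :
    (List.range (a * b)).map f
      = (List.range a).flatMap (fun j => (List.range b).map (fun i => f (j * b + i))) := by
  induction a with
  | zero => simp
  | succ n ih =>
      rw [Nat.succ_mul, List.range_add, List.map_append, ih, List.range_succ,
        List.flatMap_append]
      simp [List.map_map, Function.comp_def]

-- a map over a list as a map over its index range
theorem pvMapIndex {β : Type} (cs : List Char) (f : Char → β) :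
    (List.range cs.length).map (fun i => f (cs.getD i ' ')) = cs.map f := by
  induction cs with
  | nil => simp
  | cons c cs ih =>
      rw [List.length_cons, List.range_succ_eq_map]
      simp only [List.map_cons, List.map_map, Function.comp_def, List.getD_cons_zero,
        List.getD_cons_succ]
      rw [ih]

-- decoding rank j*|cs|+i (i < |cs|) = decoding of j followed by last digit cs[i]
theorem pvDecode_split (cs : List Char) (k j i : Nat) (hi : i < cs.length) :
    (pvDecodeLoop cs (k + 1) ((j * cs.length + i : Nat) : Int) []).reverse
      = (pvDecodeLoop cs k ((j : Nat) : Int) []).reverse ++ [cs.getD i ' '] := by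
  have hq : PySem.Int.floordiv ((j * cs.length + i : Nat) : Int) ((cs.length : Nat) : Int)
      = ((j : Nat) : Int) := by
    rw [PySem.Int.floordiv_natCast]
    congr 1
    rw [Nat.mul_comm j, Nat.mul_add_div (by omega : 0 < cs.length), Nat.div_eq_of_lt hi]
    omega
  have hr : PySem.Int.mod ((j * cs.length + i : Nat) : Int) ((cs.length : Nat) : Int)
      = ((i : Nat) : Int) := by
    rw [PySem.Int.mod_natCast]
    congr 1
    rw [Nat.mul_comm j, Nat.mul_add_mod, Nat.mod_eq_of_lt hi]
  rw [pvDecodeLoop]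
  simp only [hq, hr, List.nil_append]
  rw [pvDecodeLoop_append]
  simp [PySem.List.pyGetD_natCast]

-- main per-length lemma: decoding the ranks 0..|cs|^k-1 yields exactly the product list
theorem pvUnrank (cs : List Char) (k : Nat) :
    (List.range (cs.length ^ k)).map (fun n => (pvDecodeLoop cs k ((n : Nat) : Int) []).reverse)
      = pvProd cs k := by
  induction k with
  | zero => simp [pvDecodeLoop, pvProd]
  | succ k ih =>
      rw [pow_succ, pvRangeMulFlatMap, pvProd_snoc, ← ih, List.flatMap_map]
      apply List.flatMap_congr
      intro j hj
      rw [List.map_congr_left (fun i hi => pvDecode_split cs k j i (List.mem_range.mp hi))]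
      rw [← pvMapIndex cs (fun c => (pvDecodeLoop cs k ((j : Nat) : Int) []).reverse ++ [c])]

-- per-length equality of the two ports' inner lists
theorem pvPerLength (cs : List Char) (k : Nat) :
    (pvProd cs k).map (fun t => String.ofList t)
      = (PySem.List.pyRange 0 ((cs.length : Int) ^ k) 1).map
          (fun n => String.ofList (pvDecodeLoop cs k n []).reverse) := by
  have : ((cs.length : Int) ^ k) = ((cs.length ^ k : Nat) : Int) := by push_cast; ring
  rw [this, PySem.List.pyRange_zero_nat, List.map_map, Function.comp_def, ← pvUnrank,
    List.map_map, Function.comp_def]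

-- ===== VERDICT (by name: the statement is the Claim_ definition above) =====
theorem itert_spec : Claim_equal_itert := by
  intro start end_ charset _ _
  unfold Spec_itert itert itert_alt
  simp only
  congr 1
  funext k
  exact pvPerLength _ k.toNat
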